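-- pv_equiv track=rewrite | github.com/vagrosu/python_lab | Lab2/ex12.py | ex12
-- ===== SOURCE A (Python) =====
-- def ex12(words):
--     rhymes = {}
--
--     for word in words:
--         rhyme = word[-2:]
--
--         if rhyme not in rhymes:
--             rhymes[rhyme] = []
--         rhymes[rhyme].append(word)
--
--     return list(rhymes.values())
-- ===== SOURCE B (Python) =====
-- def ex12(words):
--     keys = []
--     for word in words:
--         key = word[-2:]
--         if key not in keys:
--             keys.append(key)
--     return [[w for w in words if w[-2:] == key] for key in keys]
-- ===== Notes on version B (the rewrite author's own statement) =====
-- stated objective: alternative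
-- what changed: Replaces the dict-of-buckets single pass with a two-phase plan: first collect the ordered list of distinct last-two-character keys, then build each bucket by filtering the whole word list per key.
import Mathlib
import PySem

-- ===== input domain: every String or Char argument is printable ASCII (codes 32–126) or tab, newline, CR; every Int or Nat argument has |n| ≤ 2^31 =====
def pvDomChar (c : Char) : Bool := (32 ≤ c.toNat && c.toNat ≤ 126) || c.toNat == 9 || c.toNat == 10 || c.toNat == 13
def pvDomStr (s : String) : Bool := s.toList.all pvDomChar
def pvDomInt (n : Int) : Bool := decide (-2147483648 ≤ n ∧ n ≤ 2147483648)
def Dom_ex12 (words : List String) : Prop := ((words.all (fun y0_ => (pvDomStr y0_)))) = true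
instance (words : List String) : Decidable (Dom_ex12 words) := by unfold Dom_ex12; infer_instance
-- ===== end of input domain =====

-- B groups words by their last-two-character rhyme with a two-phase key-list + per-key filter plan
-- instead of A's incrementally updated dict of buckets (objective: alternative decomposition, same results).

-- word[-2:] (shared by both ports: both Pythons compute this slice)
def ex12Rhyme (word : String) : String := PySem.Str.slice word (some (-2)) none

-- ===== PORT A =====
-- the body of A's for-loop
def ex12Step (rhymes : PySem.Dict String (List String)) (word : String) :
    PySem.Dict String (List String) :=
  let rhyme := ex12Rhyme word
  let rhymes' := if rhymes.contains rhyme then rhymes else rhymes.insert rhyme []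
  -- rhymes[rhyme].append(word): the key is present, so this is modify with default []
  rhymes'.modify rhyme [] (fun xs => xs ++ [word])

def ex12 (words : List String) : List (List String) :=
  (words.foldl ex12Step PySem.Dict.empty).values

-- ===== PORT B =====
-- the body of B's key-collecting loop
def ex12AltStep (ks : List String) (word : String) : List String :=
  let key := ex12Rhyme word
  if key ∈ ks then ks else ks ++ [key]

def ex12_alt (words : List String) : List (List String) :=
  let keys := words.foldl ex12AltStep []
  keys.map (fun key => words.filter (fun w => ex12Rhyme w == key))

-- ===== PRECONDITION & SPEC =====
def Spec_ex12 (words : List String) (out : List (List String)) : Prop := out = ex12_alt words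
instance (words : List String) (out : List (List String)) : Decidable (Spec_ex12 words out) := by unfold Spec_ex12; infer_instance

-- ===== CLAIM (what is proved, stated in full; the proofs are below) =====
def Claim_equal_ex12 : Prop := ∀ (words : List String), Dom_ex12 words → Spec_ex12 words (ex12 words)

-- ===== LEMMAS AND PROOFS =====

-- the dict built so far, as a function of the ordered key list and the words already seen
def ex12Snap (ks all : List String) : PySem.Dict String (List String) :=
  ⟨ks.map (fun k => (k, all.filter (fun w => ex12Rhyme w == k)))⟩

lemma ex12_contains_snap (ks all : List String) (k : String) :
    (ex12Snap ks all).contains k = decide (k ∈ ks) := by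
  by_cases h : k ∈ ks <;>
    simp [ex12Snap, PySem.Dict.contains, List.any_map, Function.comp_def, List.any_eq_true, h]
  exact fun x hx hx2 => h (hx2 ▸ hx)

lemma ex12_getD_snap_mem (ks all : List String) (k : String) (h : k ∈ ks) :
    (ex12Snap ks all).getD k [] = all.filter (fun w => ex12Rhyme w == k) := by
  simp only [ex12Snap, PySem.Dict.getD, PySem.Dict.get?, List.find?_map, Function.comp_def]
  have hsome : (ks.find? (fun k' => k' == k)).isSome := by
    rw [List.find?_isSome]; exact ⟨k, h, by simp⟩
  obtain ⟨k', hk'⟩ := Option.isSome_iff_exists.mp hsome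
  have : k' = k := by have := List.find?_some hk'; simpa using this
  subst this
  simp only [hk', Option.map_some, Option.getD_some]

-- replacing key k's bucket with its old bucket plus w is the same as filtering all ++ [w] per key
lemma ex12_insert_snap (ks all : List String) (w : String) :
    ((ex12Snap ks all).items.map
      (fun p => if p.1 == ex12Rhyme w then
        (ex12Rhyme w, all.filter (fun x => ex12Rhyme x == ex12Rhyme w) ++ [w]) else p))
      = (ex12Snap ks (all ++ [w])).items := by
  simp only [ex12Snap, List.map_map]
  refine List.map_congr_left ?_
  intro k' _
  by_cases hk : k' = ex12Rhyme w
  · subst hk; simp [List.filter_append]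
  · simp [Function.comp, beq_iff_eq, hk, List.filter_append, Ne.symm hk]

lemma ex12_loop_inv (ws : List String) : ∀ (ks all : List String),
    (∀ x ∈ all, ex12Rhyme x ∈ ks) →
    ws.foldl ex12Step (ex12Snap ks all)
      = ex12Snap (ws.foldl ex12AltStep ks) (all ++ ws) := by
  induction ws with
  | nil => intro ks all _; simp
  | cons w ws ih =>
    intro ks all hall
    have hstepsnap : ∀ (ks' : List String), ex12Rhyme w ∈ ks' →
        ex12Step (ex12Snap ks' all) w = ex12Snap ks' (all ++ [w]) := by
      intro ks' hmem
      have hc : (ex12Snap ks' all).contains (ex12Rhyme w) = true := by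
        rw [ex12_contains_snap]; simp [hmem]
      simp only [ex12Step, PySem.Dict.modify, PySem.Dict.insert, hc, if_true]
      rw [ex12_getD_snap_mem ks' all _ hmem]
      exact congrArg PySem.Dict.mk (ex12_insert_snap ks' all w)
    by_cases hmem : ex12Rhyme w ∈ ks
    · have hstep : ex12AltStep ks w = ks := by simp [ex12AltStep, hmem]
      have h1 := hstepsnap ks hmem
      calc (w :: ws).foldl ex12Step (ex12Snap ks all)
          = ws.foldl ex12Step (ex12Snap ks (all ++ [w])) := by rw [List.foldl_cons, h1]
        _ = ex12Snap (ws.foldl ex12AltStep ks) ((all ++ [w]) ++ ws) := by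
              exact ih ks (all ++ [w]) (by
                intro x hx
                rcases List.mem_append.mp hx with h | h
                · exact hall x h
                · simp at h; subst h; exact hmem)
        _ = ex12Snap ((w :: ws).foldl ex12AltStep ks) (all ++ w :: ws) := by
              rw [List.foldl_cons, hstep]; congr 1; simp
    · -- new key: first the insert of [] extends the snapshot's key list
      have hfilt : all.filter (fun x => ex12Rhyme x == ex12Rhyme w) = [] := by
        rw [List.filter_eq_nil_iff]
        intro x hx hbe
        exact hmem (beq_iff_eq.mp hbe ▸ hall x hx)
      have hc : (ex12Snap ks all).contains (ex12Rhyme w) = false := by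
        rw [ex12_contains_snap]; simp [hmem]
      have hins : (ex12Snap ks all).insert (ex12Rhyme w) [] = ex12Snap (ks ++ [ex12Rhyme w]) all := by
        simp only [PySem.Dict.insert, hc, Bool.false_eq_true, if_false]
        simp only [ex12Snap, List.map_append, List.map_cons, List.map_nil]
        rw [hfilt]
      have hstep1 : ex12Step (ex12Snap ks all) w = ex12Snap (ks ++ [ex12Rhyme w]) (all ++ [w]) := by
        have hc2 : (ex12Snap (ks ++ [ex12Rhyme w]) all).contains (ex12Rhyme w) = true := by
          rw [ex12_contains_snap]; simp
        have h2 := hstepsnap (ks ++ [ex12Rhyme w]) (by simp)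
        simp only [ex12Step, hc2, if_true] at h2
        simp only [ex12Step, hc, Bool.false_eq_true, if_false]
        rw [hins]; exact h2
      have hstepk : ex12AltStep ks w = ks ++ [ex12Rhyme w] := by simp [ex12AltStep, hmem]
      calc (w :: ws).foldl ex12Step (ex12Snap ks all)
          = ws.foldl ex12Step (ex12Snap (ks ++ [ex12Rhyme w]) (all ++ [w])) := by
            rw [List.foldl_cons, hstep1]
        _ = ex12Snap (ws.foldl ex12AltStep (ks ++ [ex12Rhyme w])) ((all ++ [w]) ++ ws) := by
            exact ih (ks ++ [ex12Rhyme w]) (all ++ [w]) (by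
              intro x hx
              rcases List.mem_append.mp hx with h | h
              · exact List.mem_append.mpr (Or.inl (hall x h))
              · simp at h; subst h; simp)
        _ = ex12Snap ((w :: ws).foldl ex12AltStep ks) (all ++ w :: ws) := by
            rw [List.foldl_cons, hstepk]; congr 1; simp

-- ===== VERDICT (by name: the statement is the Claim_ definition above) =====
theorem ex12_spec : Claim_equal_ex12 := by
  intro words _
  unfold Spec_ex12 ex12 ex12_alt
  have h := ex12_loop_inv words [] [] (by intro x hx; cases hx)
  have hempty : (PySem.Dict.empty : PySem.Dict String (List String)) = ex12Snap [] [] := rfl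
  rw [hempty, h]
  simp [ex12Snap, PySem.Dict.values, List.map_map, Function.comp]
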